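-- pv_equiv track=rewrite | github.com/PeterEckmann1/aswg-pipeline | extractor/src/pdftools.py | _start_at_section
-- ===== SOURCE A (Python) =====
-- from string import ascii_letters, ascii_uppercase
--
-- def _start_at_section(text, terms):
--     final = ''
--     reading = False
--     for line in text.split('\n'):
--         cleaned = ''.join([char for char in line.rstrip().lstrip() if char in ascii_letters + ' ']).strip()
--         if cleaned in terms:
--             reading = True
--         if reading:
--             final += line + '\n'
--     return final
-- ===== SOURCE B (Python) =====
-- from string import ascii_letters, ascii_uppercase
--
-- def _clean(line):
--     return ''.join([char for char in line.rstrip().lstrip() if char in ascii_letters + ' ']).strip()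
--
-- def _start_at_section(text, terms):
--     lines = text.split('\n')
--     i = next((k for k, line in enumerate(lines) if _clean(line) in terms), None)
--     if i is None:
--         return ''
--     return '\n'.join(lines[i:]) + '\n'
-- ===== Notes on version B (the rewrite author's own statement) =====
-- stated objective: simpler
-- what changed: Replaces A's stateful accumulate loop (reading flag + string +=) with locate-then-slice: find the index of the first matching line, then join the tail in one step.
import Mathlib
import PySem

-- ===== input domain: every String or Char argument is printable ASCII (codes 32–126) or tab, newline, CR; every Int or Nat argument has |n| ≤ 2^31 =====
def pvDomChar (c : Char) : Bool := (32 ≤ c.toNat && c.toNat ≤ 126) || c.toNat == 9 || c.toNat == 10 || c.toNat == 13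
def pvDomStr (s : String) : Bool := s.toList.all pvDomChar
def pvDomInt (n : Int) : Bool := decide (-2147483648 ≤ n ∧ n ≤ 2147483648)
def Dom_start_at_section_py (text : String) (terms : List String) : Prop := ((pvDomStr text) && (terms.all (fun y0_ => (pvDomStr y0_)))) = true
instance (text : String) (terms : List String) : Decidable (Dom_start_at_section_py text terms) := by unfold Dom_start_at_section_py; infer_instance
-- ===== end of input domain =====

-- B replaces A's stateful accumulate loop with locate-then-slice (find first matching line, join the tail); objective: simpler.

-- `char in ascii_letters + ' '` (exact: ascii_letters is exactly a-z, A-Z)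
def pvAllowed (c : Char) : Bool :=
  (('a' ≤ c && c ≤ 'z') || ('A' ≤ c && c ≤ 'Z')) || c == ' '

-- ===== PORT A =====
-- the loop body: state = (final as char list, reading); a faithful transliteration of A's for-loop
def pvStepA (terms : List String) (st : List Char × Bool) (line : String) : List Char × Bool :=
  let cleaned := PySem.Str.strip (String.ofList ((PySem.Str.lstrip (PySem.Str.rstrip line)).toList.filter pvAllowed))
  let reading := if terms.contains cleaned then true else st.2
  let final := if reading then st.1 ++ line.toList ++ ['\n'] else st.1
  (final, reading)

def start_at_section_py (text : String) (terms : List String) : String :=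
  let r := ((PySem.Str.split? text "\n").getD [""]).foldl (pvStepA terms) ([], false)
  String.ofList r.1

-- ===== PORT B =====
def pvClean (line : String) : String :=
  PySem.Str.strip (String.ofList ((PySem.Str.lstrip (PySem.Str.rstrip line)).toList.filter pvAllowed))

def start_at_section_py_alt (text : String) (terms : List String) : String :=
  let lines := (PySem.Str.split? text "\n").getD [""]
  match lines.findIdx? (fun line => terms.contains (pvClean line)) with
  | none => ""
  | some i => PySem.Str.join "\n" (lines.drop i) ++ "\n"

-- ===== PRECONDITION & SPEC =====
def Spec_start_at_section_py (text : String) (terms : List String) (out : String) : Prop := out = start_at_section_py_alt text terms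
instance (text : String) (terms : List String) (out : String) : Decidable (Spec_start_at_section_py text terms out) := by unfold Spec_start_at_section_py; infer_instance

-- ===== CLAIM (what is proved, stated in full; the proofs are below) =====
def Claim_equal_start_at_section_py : Prop := ∀ (text : String) (terms : List String), Dom_start_at_section_py text terms → Spec_start_at_section_py text terms (start_at_section_py text terms)

-- ===== LEMMAS AND PROOFS =====

-- once `reading` is true it stays true and every remaining line is appended
theorem pv_fold_true (terms : List String) (ls : List String) (acc : List Char) :
    (ls.foldl (pvStepA terms) (acc, true)).1
      = acc ++ (ls.map (fun l => l.toList ++ ['\n'])).flatten := by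
  induction ls generalizing acc with
  | nil => simp
  | cons l ls ih =>
    simp only [List.foldl_cons, pvStepA]
    split <;> simp [ih, List.append_assoc]

-- from `reading = false`, the result is the flattened tail from the first matching line on
theorem pv_fold_false (terms : List String) (ls : List String) (acc : List Char) :
    (ls.foldl (pvStepA terms) (acc, false)).1
      = acc ++ (match ls.findIdx? (fun line => terms.contains (pvClean line)) with
                | none => []
                | some i => ((ls.drop i).map (fun l => l.toList ++ ['\n'])).flatten) := by
  induction ls generalizing acc with
  | nil => simp
  | cons l ls ih =>
    rw [List.foldl_cons, List.findIdx?_cons]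
    by_cases h : terms.contains (pvClean l) = true
    · have hs : pvStepA terms (acc, false) l = (acc ++ (l.toList ++ ['\n']), true) := by
        simp only [pvStepA, pvClean] at h ⊢
        rw [h]
        simp [List.append_assoc]
      rw [hs, pv_fold_true]
      simp only [h]
      simp [List.append_assoc]
    · have hs : pvStepA terms (acc, false) l = (acc, false) := by
        simp only [pvStepA, pvClean] at h ⊢
        rw [Bool.not_eq_true] at h
        rw [h]
        simp
      rw [hs, ih]
      simp only [h]
      simp only [Bool.false_eq_true, if_false]
      cases hf : ls.findIdx? (fun line => terms.contains (pvClean line)) <;> simp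

-- joining a nonempty list with '\n' and appending '\n' = flattening the lines each followed by '\n'
theorem pv_join_flatten (l : String) (ls : List String) :
    PySem.Chars.join ['\n'] ((l :: ls).map String.toList) ++ ['\n']
      = ((l :: ls).map (fun s => s.toList ++ ['\n'])).flatten := by
  induction ls generalizing l with
  | nil => simp [PySem.Chars.join_singleton]
  | cons m ls ih =>
    have h := ih m
    simp only [List.map_cons] at h ⊢
    rw [PySem.Chars.join_cons_cons]
    simp [List.append_assoc, h]

theorem pv_string_eq_of_toList {s t : String} (h : s.toList = t.toList) : s = t := by
  have h2 := congrArg String.ofList h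
  simpa [String.ofList_toList] using h2

-- ===== VERDICT (by name: the statement is the Claim_ definition above) =====
theorem start_at_section_py_spec : Claim_equal_start_at_section_py := by
  intro text terms _
  unfold Spec_start_at_section_py start_at_section_py start_at_section_py_alt
  dsimp only
  set ls := (PySem.Str.split? text "\n").getD [""] with hls
  rw [pv_fold_false]
  cases hf : ls.findIdx? (fun line => terms.contains (pvClean line)) with
  | none => simp
  | some i =>
    simp only [List.nil_append]
    have hi : i < ls.length := by
      have := List.findIdx?_eq_some_iff_findIdx_eq.mp hf
      exact this.1
    have hdrop : ls.drop i ≠ [] := by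
      simp [List.drop_eq_nil_iff]; omega
    obtain ⟨l, rest, hcons⟩ := List.exists_cons_of_ne_nil hdrop
    apply pv_string_eq_of_toList
    simp only [String.toList_ofList]
    rw [hcons]
    have : (PySem.Str.join "\n" (l :: rest) ++ "\n").toList
        = PySem.Chars.join ['\n'] ((l :: rest).map String.toList) ++ ['\n'] := by
      simp [PySem.Str.toList_join]
    rw [this, pv_join_flatten]
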